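-- pv_equiv track=rewrite | github.com/bhargava-morampalli/rnamodbench | bin/tool_availability_reporting.py | _collapse_statuses
-- ===== SOURCE A (Python) =====
-- from typing import Dict, Iterable, List, Optional, Sequence, Tuple
--
-- def _collapse_statuses(statuses: Sequence[str], observed_count: int, required_count: int) -> str:
--     if observed_count == 0:
--         return "MISSING_TRACE"
--     status_set = {status for status in statuses if status}
--     if "FAILED" in status_set:
--         return "FAILED"
--     if "ABORTED" in status_set:
--         return "ABORTED"
--     if observed_count < required_count:
--         return "PARTIAL"
--     if status_set == {"COMPLETED"}:
--         return "COMPLETED"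
--     return "PARTIAL"
-- ===== SOURCE B (Python) =====
-- RANK = {"COMPLETED": 0, "ABORTED": 2, "FAILED": 3}
--
--
-- def _collapse_statuses(statuses, observed_count, required_count):
--     # Reduce the statuses to a single numeric severity (max of per-status
--     # ranks, unknown non-empty statuses rank 1, no non-empty status -> -1),
--     # then decode that scalar; no set and no per-label membership scans.
--     if observed_count == 0:
--         return "MISSING_TRACE"
--     severity = max((RANK.get(s, 1) for s in statuses if s), default=-1)
--     if severity >= 2:
--         return "FAILED" if severity == 3 else "ABORTED"
--     if observed_count < required_count or severity != 0:
--         return "PARTIAL"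
--     return "COMPLETED"
-- ===== Notes on version B (the rewrite author's own statement) =====
-- stated objective: alternative
-- what changed: Instead of building a set of non-empty statuses and testing membership/set-equality against each label, B maps every non-empty status to a numeric severity rank, reduces them with max (default -1), and decodes the resulting scalar into the label.
import Mathlib
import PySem

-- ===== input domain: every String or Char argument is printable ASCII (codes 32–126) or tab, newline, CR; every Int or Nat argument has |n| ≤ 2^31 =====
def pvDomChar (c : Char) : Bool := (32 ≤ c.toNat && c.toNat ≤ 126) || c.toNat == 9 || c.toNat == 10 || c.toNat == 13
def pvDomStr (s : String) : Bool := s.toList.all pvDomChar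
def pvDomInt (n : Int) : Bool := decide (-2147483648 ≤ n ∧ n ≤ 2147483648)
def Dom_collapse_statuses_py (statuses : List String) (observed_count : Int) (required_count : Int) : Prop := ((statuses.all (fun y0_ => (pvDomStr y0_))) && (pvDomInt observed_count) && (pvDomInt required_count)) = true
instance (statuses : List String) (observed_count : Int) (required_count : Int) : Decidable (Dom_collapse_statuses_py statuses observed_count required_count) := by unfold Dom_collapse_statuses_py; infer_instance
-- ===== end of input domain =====

-- B replaces A's set-of-statuses plus membership/set-equality tests by a
-- max-severity reduction to one scalar that is then decoded (objective: alternative).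

-- ===== PORT A =====
def collapse_statuses_py (statuses : List String) (observed_count : Int) (required_count : Int) : String :=
  if observed_count = 0 then "MISSING_TRACE"
  else
    let status_set : PySem.Set String := PySem.Set.ofList (statuses.filter (fun status => status ≠ ""))
    if PySem.Set.contains status_set "FAILED" then "FAILED"
    else if PySem.Set.contains status_set "ABORTED" then "ABORTED"
    else if observed_count < required_count then "PARTIAL"
    else if PySem.Set.equal status_set (PySem.Set.ofList ["COMPLETED"]) then "COMPLETED"
    else "PARTIAL"

-- ===== PORT B =====
-- RANK.get(s, 1): the module-level dict lookup with default
def pvRank (s : String) : Int :=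
  if s == "COMPLETED" then 0 else if s == "ABORTED" then 2 else if s == "FAILED" then 3 else 1

-- max((RANK.get(s, 1) for s in statuses if s), default=-1): the running max over
-- the generator's elements, starting from the default (exact: every rank is ≥ 0 > -1)
def collapse_statuses_py_alt (statuses : List String) (observed_count : Int) (required_count : Int) : String :=
  if observed_count = 0 then "MISSING_TRACE"
  else
    let severity := ((statuses.filter (fun s => s ≠ "")).map pvRank).foldl max (-1)
    if 2 ≤ severity then (if severity = 3 then "FAILED" else "ABORTED")
    else if observed_count < required_count ∨ severity ≠ 0 then "PARTIAL"
    else "COMPLETED"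

-- ===== PRECONDITION & SPEC =====
def Spec_collapse_statuses_py (statuses : List String) (observed_count : Int) (required_count : Int) (out : String) : Prop := out = collapse_statuses_py_alt statuses observed_count required_count
instance (statuses : List String) (observed_count : Int) (required_count : Int) (out : String) : Decidable (Spec_collapse_statuses_py statuses observed_count required_count out) := by unfold Spec_collapse_statuses_py; infer_instance

-- ===== CLAIM =====
def Claim_equal_collapse_statuses_py : Prop := ∀ (statuses : List String) (observed_count : Int) (required_count : Int), Dom_collapse_statuses_py statuses observed_count required_count → Spec_collapse_statuses_py statuses observed_count required_count (collapse_statuses_py statuses observed_count required_count)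

-- ===== LEMMAS AND PROOFS =====

-- the four facts about `statuses` the two programs each observe in their own way
def pvF (l : List String) : Bool := l.any (fun s => s == "FAILED")
def pvAb (l : List String) : Bool := l.any (fun s => s == "ABORTED")
def pvK (l : List String) : Bool := l.any (fun s => s == "COMPLETED")
def pvO (l : List String) : Bool :=
  l.any (fun s => decide (s ≠ "") && !(s == "COMPLETED") && !(s == "ABORTED") && !(s == "FAILED"))

-- the value B's max-fold reduces to, expressed from those facts
def pvV (l : List String) : Int :=
  if pvF l then 3 else if pvAb l then 2 else if pvO l then 1 else if pvK l then 0 else -1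

theorem pvV_bounds (l : List String) : -1 ≤ pvV l ∧ pvV l ≤ 3 := by
  unfold pvV; split_ifs <;> omega

theorem pv_fold_eq (l : List String) : ∀ (m : Int), -1 ≤ m →
    ((l.filter (fun s => s ≠ "")).map pvRank).foldl max m = max m (pvV l) := by
  induction l with
  | nil => intro m hm; simp [pvV, pvF, pvAb, pvK, pvO]; omega
  | cons x xs ih =>
    intro m hm
    by_cases hx : x = ""
    · have hV : pvV (x :: xs) = pvV xs := by
        simp [pvV, pvF, pvAb, pvK, pvO, hx]
      simp only [List.filter_cons, hx]
      simpa [hV] using ih m hm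
    · have hstep : ((x :: xs).filter (fun s => s ≠ "")).map pvRank
          = pvRank x :: ((xs.filter (fun s => s ≠ "")).map pvRank) := by
        simp [hx]
      rw [hstep, List.foldl_cons, ih (max m (pvRank x)) (by unfold pvRank; split_ifs <;> omega)]
      have hxsb := pvV_bounds xs
      have key : max (pvRank x) (pvV xs) = pvV (x :: xs) := by
        by_cases h1 : x = "COMPLETED"
        · simp [pvRank, pvV, pvF, pvAb, pvK, pvO, h1]
          unfold pvV at hxsb
          split_ifs with hF hA hO hK <;> split_ifs at hxsb <;> omega
        · by_cases h2 : x = "ABORTED"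
          · simp [pvRank, pvV, pvF, pvAb, pvK, pvO, h2]
            unfold pvV at hxsb
            split_ifs with hF <;> simp_all
          · by_cases h3 : x = "FAILED"
            · simp [pvRank, pvV, pvF, pvAb, pvK, pvO, h3]
              unfold pvV at hxsb
              split_ifs at hxsb <;> omega
            · simp [pvRank, pvV, pvF, pvAb, pvK, pvO, h1, h2, h3, hx]
              unfold pvV at hxsb
              split_ifs <;> simp_all
      rw [max_assoc, key]

theorem pv_contains_F (l : List String) :
    PySem.Set.contains (PySem.Set.ofList (l.filter (fun s => s ≠ ""))) "FAILED" = pvF l := by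
  rw [Bool.eq_iff_iff, PySem.Set.contains_iff, PySem.Set.mem_ofList]
  simp only [pvF, List.mem_filter, List.any_eq_true, beq_iff_eq, decide_eq_true_eq]
  constructor
  · rintro ⟨hm, _⟩; exact ⟨"FAILED", hm, rfl⟩
  · rintro ⟨s, hs, rfl⟩; exact ⟨hs, by simp⟩

theorem pv_contains_Ab (l : List String) :
    PySem.Set.contains (PySem.Set.ofList (l.filter (fun s => s ≠ ""))) "ABORTED" = pvAb l := by
  rw [Bool.eq_iff_iff, PySem.Set.contains_iff, PySem.Set.mem_ofList]
  simp only [pvAb, List.mem_filter, List.any_eq_true, beq_iff_eq, decide_eq_true_eq]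
  constructor
  · rintro ⟨hm, _⟩; exact ⟨"ABORTED", hm, rfl⟩
  · rintro ⟨s, hs, rfl⟩; exact ⟨hs, by simp⟩

theorem pv_equal_C (l : List String) :
    PySem.Set.equal (PySem.Set.ofList (l.filter (fun s => s ≠ "")))
        (PySem.Set.ofList ["COMPLETED"])
      = (pvK l && !pvF l && !pvAb l && !pvO l) := by
  rw [Bool.eq_iff_iff, PySem.Set.equal_iff]
  have hmem : ∀ x : String, (x ∈ PySem.Set.ofList (l.filter (fun s => s ≠ ""))) ↔ (x ∈ l ∧ ¬x = "") := by
    intro x; rw [PySem.Set.mem_ofList]; simp [List.mem_filter]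
  have hmem1 : ∀ x : String, (x ∈ PySem.Set.ofList ["COMPLETED"]) ↔ x = "COMPLETED" := by
    intro x; rw [PySem.Set.mem_ofList]; simp
  have hK : (pvK l = true) ↔ ∃ s, s ∈ l ∧ s = "COMPLETED" := by simp [pvK]
  have hF : (pvF l = false) ↔ ∀ s, s ∈ l → ¬s = "FAILED" := by simp [pvF]
  have hAb : (pvAb l = false) ↔ ∀ s, s ∈ l → ¬s = "ABORTED" := by simp [pvAb]
  have hO : (pvO l = false) ↔
      ∀ s, s ∈ l → s = "" ∨ s = "COMPLETED" ∨ s = "ABORTED" ∨ s = "FAILED" := by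
    simp only [pvO, List.any_eq_false, Bool.and_eq_true, Bool.not_eq_true', not_and,
      decide_eq_true_eq, beq_eq_false_iff_ne, ne_eq, not_not]
    constructor
    · intro h s hs
      by_cases h1 : s = ""
      · exact Or.inl h1
      · by_cases h2 : s = "COMPLETED"
        · exact Or.inr (Or.inl h2)
        · by_cases h3 : s = "ABORTED"
          · exact Or.inr (Or.inr (Or.inl h3))
          · exact Or.inr (Or.inr (Or.inr (h s hs ⟨⟨h1, h2⟩, h3⟩)))
    · rintro h s hs ⟨⟨h1, h2⟩, h3⟩
      rcases h s hs with h' | h' | h' | h'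
      · exact absurd h' h1
      · exact absurd h' h2
      · exact absurd h' h3
      · exact h'
  simp only [hmem, hmem1, Bool.and_eq_true, Bool.not_eq_true', hK, hF, hAb, hO]
  constructor
  · intro heq
    refine ⟨⟨⟨⟨"COMPLETED", ((heq "COMPLETED").mpr rfl).1, rfl⟩, ?_⟩, ?_⟩, ?_⟩
    · intro s hs h
      subst h
      exact absurd ((heq "FAILED").mp ⟨hs, by decide⟩) (by decide)
    · intro s hs h
      subst h
      exact absurd ((heq "ABORTED").mp ⟨hs, by decide⟩) (by decide)
    · intro s hs
      by_cases hse : s = ""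
      · exact Or.inl hse
      · exact Or.inr (Or.inl ((heq s).mp ⟨hs, hse⟩))
  · rintro ⟨⟨⟨⟨w, hw, rfl⟩, hFa⟩, hAa⟩, hOa⟩ x
    constructor
    · rintro ⟨hx, hxne⟩
      rcases hOa x hx with h | h | h | h
      · exact absurd h hxne
      · exact h
      · exact absurd h (hAa x hx)
      · exact absurd h (hFa x hx)
    · rintro rfl
      exact ⟨hw, by decide⟩

theorem collapse_statuses_eq (statuses : List String) (observed_count required_count : Int) :
    collapse_statuses_py statuses observed_count required_count =
    collapse_statuses_py_alt statuses observed_count required_count := by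
  unfold collapse_statuses_py collapse_statuses_py_alt
  by_cases h0 : observed_count = 0
  · simp [h0]
  · simp only [h0, if_false,
      pv_fold_eq statuses (-1) (le_refl _),
      pv_contains_F, pv_contains_Ab, pv_equal_C]
    have hmax : max (-1 : Int) (pvV statuses) = pvV statuses := by
      have := pvV_bounds statuses; omega
    rw [hmax]
    unfold pvV
    rcases hF : pvF statuses <;> rcases hA : pvAb statuses <;>
      rcases hO : pvO statuses <;> rcases hK : pvK statuses <;>
      simp

-- ===== VERDICT =====
theorem collapse_statuses_py_spec : Claim_equal_collapse_statuses_py := by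
  intro statuses oc rc _
  exact collapse_statuses_eq statuses oc rc
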